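-- pv_equiv track=rewrite | github.com/thepropterhoc/FrontPageOfSound | eyeD3-0.1.0/build/lib.linux-x86_64-2.7/eyeD3/binfuncs.py | bin2synchsafe
-- ===== SOURCE A (Python) =====
-- def bin2synchsafe(x):
--   x.reverse()
--   out = []
--   c = 0
--   while len(x) > 0:
--     c += 1
--     if c == 1:
--       out.append(0)
--     y = x.pop()
--     out.append(y)
--     if c == 7:
--       c = 0
--   return out
-- ===== SOURCE B (Python) =====
-- def bin2synchsafe(x):
--   out = []
--   while x:
--     chunk = x[:7]
--     del x[:7]
--     out.append(0)
--     out.extend(chunk)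
--   return out
-- ===== Notes on version B (the rewrite author's own statement) =====
-- stated objective: simpler
-- what changed: Replaces A's reverse-then-pop-one-element loop with a manual 1..7 counter by a chunking loop that slices off seven bits at a time (chunk = x[:7]; del x[:7]) and emits 0 followed by the chunk; no reversal and no counter state.
import Mathlib
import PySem

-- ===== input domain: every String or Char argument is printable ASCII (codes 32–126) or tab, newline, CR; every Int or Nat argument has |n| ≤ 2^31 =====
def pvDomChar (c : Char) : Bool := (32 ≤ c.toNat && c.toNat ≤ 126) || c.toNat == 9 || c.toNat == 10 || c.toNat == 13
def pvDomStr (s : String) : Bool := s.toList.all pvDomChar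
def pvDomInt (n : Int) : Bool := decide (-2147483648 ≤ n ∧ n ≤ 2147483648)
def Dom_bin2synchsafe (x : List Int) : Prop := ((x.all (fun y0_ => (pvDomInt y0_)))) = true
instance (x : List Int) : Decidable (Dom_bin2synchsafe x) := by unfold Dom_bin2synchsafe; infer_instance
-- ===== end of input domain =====

-- B replaces the reverse/pop/counter loop by a seven-bit chunking loop (simpler decomposition,
-- same O(n) cost). Both A and B empty the argument list in place; the equivalence proved here is
-- about the return value.

-- ===== PORT A =====
-- while len(x) > 0: c += 1; if c == 1: out.append(0); y = x.pop(); out.append(y); if c == 7: c = 0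
def bin2synchsafeLoop (x out : List Int) (c : Int) : List Int :=
  if h : 0 < x.length then
    bin2synchsafeLoop x.dropLast
      ((if c + 1 = 1 then out ++ [0] else out) ++ [x.getLast (List.ne_nil_of_length_pos h)])
      (if c + 1 = 7 then 0 else c + 1)
  else out
termination_by x.length
decreasing_by simp [List.length_dropLast]; omega

def bin2synchsafe (x : List Int) : List Int :=
  bin2synchsafeLoop x.reverse [] 0

-- ===== PORT B =====
-- while x: chunk = x[:7]; del x[:7]; out.append(0); out.extend(chunk)
def bin2synchsafeAltLoop (x out : List Int) : List Int :=
  if x = [] then out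
  else bin2synchsafeAltLoop (x.drop 7) (out ++ 0 :: x.take 7)
termination_by x.length
decreasing_by
  rename_i h
  have : x.length ≠ 0 := by simpa [List.length_eq_zero_iff] using h
  simp [List.length_drop]; omega

def bin2synchsafe_alt (x : List Int) : List Int :=
  bin2synchsafeAltLoop x []

-- ===== PRECONDITION & SPEC =====
def Spec_bin2synchsafe (x : List Int) (out : List Int) : Prop := out = bin2synchsafe_alt x
instance (x : List Int) (out : List Int) : Decidable (Spec_bin2synchsafe x out) := by unfold Spec_bin2synchsafe; infer_instance

-- ===== CLAIM (what is proved, stated in full; the proofs are below) =====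
def Claim_equal_bin2synchsafe : Prop := ∀ (x : List Int), Dom_bin2synchsafe x → Spec_bin2synchsafe x (bin2synchsafe x)

-- ===== LEMMAS AND PROOFS =====

-- head-consuming reformulation of A's loop (A pops from the end of the reversed list)
def loopA (l out : List Int) (c : Int) : List Int :=
  match l with
  | [] => out
  | y :: t =>
      loopA t ((if c + 1 = 1 then out ++ [0] else out) ++ [y]) (if c + 1 = 7 then 0 else c + 1)

lemma loopA_eq (l : List Int) : ∀ (out : List Int) (c : Int),
    bin2synchsafeLoop l.reverse out c = loopA l out c := by
  induction l with
  | nil => intro out c; simp [bin2synchsafeLoop, loopA]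
  | cons y t ih =>
      intro out c
      rw [bin2synchsafeLoop]
      have hrev : (y :: t).reverse = t.reverse ++ [y] := by simp
      simp only [hrev, List.length_append, List.length_reverse, List.length_cons,
        List.getLast_concat, List.dropLast_concat]
      rw [dif_pos (by omega)]
      exact ih _ _

lemma loopA_acc (l : List Int) : ∀ (out : List Int) (c : Int),
    loopA l out c = out ++ loopA l [] c := by
  induction l with
  | nil => intro out c; simp [loopA]
  | cons y t ih =>
      intro out c
      rw [loopA, loopA]
      rw [ih ((if c + 1 = 1 then out ++ [0] else out) ++ [y]),
          ih ((if c + 1 = 1 then ([] : List Int) ++ [0] else []) ++ [y])]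
      split_ifs <;> simp

lemma altLoop_acc : ∀ (n : Nat) (l out : List Int), l.length ≤ n →
    bin2synchsafeAltLoop l out = out ++ bin2synchsafeAltLoop l [] := by
  intro n
  induction n with
  | zero =>
      intro l out h
      have hl : l = [] := by
        cases l with
        | nil => rfl
        | cons a t => simp at h
      subst hl; simp [bin2synchsafeAltLoop]
  | succ n ih =>
      intro l out h
      rw [bin2synchsafeAltLoop]
      conv_rhs => rw [bin2synchsafeAltLoop]
      by_cases hl : l = []
      · simp [hl]
      · have hlen : l.length ≠ 0 := by simpa [List.length_eq_zero_iff] using hl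
        have hd : (l.drop 7).length ≤ n := by simp [List.length_drop]; omega
        rw [if_neg hl, if_neg hl, ih (l.drop 7) _ hd]
        simp
        rw [ih (l.drop 7) (0 :: List.take 7 l) hd]
        simp

lemma main_lemma (l : List Int) : ∀ (c : Nat), c ≤ 6 →
    loopA l [] (c : Int) =
      if c = 0 then bin2synchsafeAltLoop l []
      else l.take (7 - c) ++ bin2synchsafeAltLoop (l.drop (7 - c)) [] := by
  induction l with
  | nil =>
      intro c hc
      simp [loopA, bin2synchsafeAltLoop]
  | cons y t ih =>
      intro c hc
      rw [loopA, loopA_acc]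
      have hunfoldB : bin2synchsafeAltLoop (y :: t) [] =
          (0 :: y :: t.take 6) ++ bin2synchsafeAltLoop (t.drop 6) [] := by
        rw [bin2synchsafeAltLoop, if_neg (by simp)]
        rw [altLoop_acc (List.drop 7 (y :: t)).length (List.drop 7 (y :: t))
              ([] ++ 0 :: List.take 7 (y :: t)) (le_refl _)]
        simp
      interval_cases c
      · -- c = 0
        norm_num
        have h1 := ih 1 (by omega)
        norm_num at h1
        rw [hunfoldB, h1]
        simp
      · norm_num
        have h2 := ih 2 (by omega)
        norm_num at h2
        simp [h2]
      · norm_num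
        have h3 := ih 3 (by omega)
        norm_num at h3
        simp [h3]
      · norm_num
        have h4 := ih 4 (by omega)
        norm_num at h4
        simp [h4]
      · norm_num
        have h5 := ih 5 (by omega)
        norm_num at h5
        simp [h5]
      · norm_num
        have h6 := ih 6 (by omega)
        norm_num at h6
        simp [h6]
      · -- c = 6 : counter resets
        norm_num
        have h0 := ih 0 (by omega)
        norm_num at h0
        simp [h0]

-- ===== VERDICT (by name: the statement is the Claim_ definition above) =====
theorem bin2synchsafe_spec : Claim_equal_bin2synchsafe := by
  intro x _
  unfold Spec_bin2synchsafe bin2synchsafe bin2synchsafe_alt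
  rw [loopA_eq]
  have := main_lemma x 0 (by omega)
  simpa using this
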